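-- pv_equiv track=rewrite | github.com/dh0508/algorithm | 백준/Silver/20529. 가장 가까운 세 사람의 심리적 거리/가장 가까운 세 사람의 심리적 거리.py | ps_dis
-- ===== SOURCE A (Python) =====
-- def ps_dis(a, b, c):
--     dis = 0
--     for i in range(len(a)):
--         if a[i] != b[i]:
--             dis += 1
--         if b[i] != c[i]:
--             dis += 1
--         if a[i] != c[i]:
--             dis += 1
--     return dis
-- ===== SOURCE B (Python) =====
-- def ps_dis(a, b, c):
--     # per position, count mismatched pairs via the number of distinct characters:
--     # 1 distinct -> 0 mismatched pairs, 2 distinct -> 2, 3 distinct -> 3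
--     table = (0, 0, 2, 3)
--     return sum(table[len({a[i], b[i], c[i]})] for i in range(len(a)))
-- ===== Notes on version B (the rewrite author's own statement) =====
-- stated objective: alternative
-- what changed: Replaces the three per-position inequality tests and conditional increments by computing the number of distinct characters at each position (a set) and mapping that cardinality through a fixed table (0,0,2,3) of mismatched-pair counts, summed with a generator expression.
import Mathlib
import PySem

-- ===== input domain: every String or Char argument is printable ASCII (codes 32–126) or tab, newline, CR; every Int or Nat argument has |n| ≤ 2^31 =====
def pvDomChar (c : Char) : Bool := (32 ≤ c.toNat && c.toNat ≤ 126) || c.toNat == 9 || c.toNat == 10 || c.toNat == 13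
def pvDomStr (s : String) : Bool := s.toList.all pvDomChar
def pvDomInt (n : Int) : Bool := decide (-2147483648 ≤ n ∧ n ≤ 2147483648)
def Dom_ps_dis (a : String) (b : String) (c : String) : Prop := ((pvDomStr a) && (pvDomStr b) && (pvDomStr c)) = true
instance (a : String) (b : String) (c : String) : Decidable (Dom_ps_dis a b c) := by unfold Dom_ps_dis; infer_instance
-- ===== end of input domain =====

-- B replaces the three per-position inequality tests by mapping the number of
-- distinct characters at each position through a fixed table of pair counts (alternative decomposition, same cost).


-- ===== PORT A =====
def ps_dis (a : String) (b : String) (c : String) : Int :=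
  (PySem.List.pyRange 0 (a.toList.length : Int) 1).foldl (fun dis i =>
    let ai := PySem.List.pyGetD a.toList i ' '
    let bi := PySem.List.pyGetD b.toList i ' '
    let ci := PySem.List.pyGetD c.toList i ' '
    let dis := if ai ≠ bi then dis + 1 else dis
    let dis := if bi ≠ ci then dis + 1 else dis
    if ai ≠ ci then dis + 1 else dis) 0

-- ===== PORT B =====
def ps_dis_alt (a : String) (b : String) (c : String) : Int :=
  ((PySem.List.pyRange 0 (a.toList.length : Int) 1).map (fun i =>
    PySem.List.pyGetD ([0, 0, 2, 3] : List Int)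
      ((PySem.Set.ofList [PySem.List.pyGetD a.toList i ' ',
                          PySem.List.pyGetD b.toList i ' ',
                          PySem.List.pyGetD c.toList i ' ']).length : Int) 0)).sum

-- ===== PRECONDITION & SPEC =====
-- Pre_ excludes exactly the inputs where Python A raises IndexError (b or c shorter than a); B raises there too.
def Pre_ps_dis (a : String) (b : String) (c : String) : Prop :=
  a.toList.length ≤ b.toList.length ∧ a.toList.length ≤ c.toList.length
instance (a : String) (b : String) (c : String) : Decidable (Pre_ps_dis a b c) := by unfold Pre_ps_dis; infer_instance
def pvWitness_ps_dis : String × String × String := ("abc", "axc", "ayz")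
def Spec_ps_dis (a : String) (b : String) (c : String) (out : Int) : Prop := out = ps_dis_alt a b c
instance (a : String) (b : String) (c : String) (out : Int) : Decidable (Spec_ps_dis a b c out) := by unfold Spec_ps_dis; infer_instance

-- ===== CLAIM (what is proved, stated in full; the proofs are below) =====
def Claim_equal_ps_dis : Prop := ∀ (a : String) (b : String) (c : String), Dom_ps_dis a b c → Pre_ps_dis a b c → Spec_ps_dis a b c (ps_dis a b c)

-- ===== LEMMAS AND PROOFS =====

-- per position: the if-chain adds exactly the table value of the distinct-character count
theorem ps_dis_step (d : Int) (x y z : Char) :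
    (let d1 := if x ≠ y then d + 1 else d
     let d2 := if y ≠ z then d1 + 1 else d1
     if x ≠ z then d2 + 1 else d2) =
    d + PySem.List.pyGetD ([0, 0, 2, 3] : List Int)
          ((PySem.Set.ofList [x, y, z]).length : Int) 0 := by
  by_cases hxy : x = y <;> by_cases hyz : y = z <;> by_cases hxz : x = z <;>
    simp_all [PySem.Set.ofList, PySem.Set.add, PySem.Set.contains, PySem.List.pyGetD,
      PySem.List.pyIdx?, eq_comm] <;> omega

-- folding "add g i" equals adding the sum of the mapped list
theorem foldl_add_sum (g : Int → Int) (l : List Int) :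
    ∀ (d : Int), l.foldl (fun acc i => acc + g i) d = d + (l.map g).sum := by
  induction l with
  | nil => intro d; simp
  | cons i t ih => intro d; simp [List.foldl, ih]; ring

theorem ps_dis_eq (a b c : String) : ps_dis a b c = ps_dis_alt a b c := by
  unfold ps_dis ps_dis_alt
  have hstep :
      (fun (dis : Int) (i : Int) =>
        let ai := PySem.List.pyGetD a.toList i ' '
        let bi := PySem.List.pyGetD b.toList i ' '
        let ci := PySem.List.pyGetD c.toList i ' '
        let dis := if ai ≠ bi then dis + 1 else dis
        let dis := if bi ≠ ci then dis + 1 else dis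
        if ai ≠ ci then dis + 1 else dis) =
      (fun (dis : Int) (i : Int) => dis +
        PySem.List.pyGetD ([0, 0, 2, 3] : List Int)
          ((PySem.Set.ofList [PySem.List.pyGetD a.toList i ' ',
                              PySem.List.pyGetD b.toList i ' ',
                              PySem.List.pyGetD c.toList i ' ']).length : Int) 0) := by
    funext dis i
    exact ps_dis_step dis _ _ _
  rw [hstep, foldl_add_sum]
  simp

-- ===== VERDICT (by name: the statement is the Claim_ definition above) =====
theorem ps_dis_spec : Claim_equal_ps_dis := by
  intro a b c _ _
  unfold Spec_ps_dis
  exact ps_dis_eq a b c
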